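-- pv_equiv track=rewrite | github.com/datpq/competitive-programming | adventofcode/2024/python/02_2.py | solve_tolerate
-- ===== SOURCE A (Python) =====
-- def arr(v, i, idx):
--     if i < idx:
--         return v[i]
--     else:
--         return v[i+1]
--
-- def solve_tolerate(v, idx):
--     if len(v) < 3:
--         return False
--     inc = arr(v, 0, idx) < arr(v, 1, idx)
--     for i in range(len(v)-2):
--         if (inc and arr(v, i, idx) >= arr(v, i+1, idx)) or (not inc and arr(v, i, idx) < arr(v, i+1, idx)):
--             return False
--         if arr(v, i, idx) == arr(v, i+1, idx) or abs(arr(v, i, idx)-arr(v, i+1, idx)) > 3: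
--             return False
--     return True
-- ===== SOURCE B (Python) =====
-- def solve_tolerate(v, idx):
--     if len(v) < 3:
--         return False
--     w = [v[i] if i < idx else v[i + 1] for i in range(len(v) - 1)]
--     diffs = [w[i + 1] - w[i] for i in range(len(w) - 1)]
--     return all(1 <= d <= 3 for d in diffs) or all(-3 <= d <= -1 for d in diffs)
-- ===== Notes on version B (the rewrite author's own statement) =====
-- stated objective: alternative
-- what changed: Replaces the direction-flag loop with pairwise early returns by materialising the filtered sequence and its difference list once, then testing the two allowed monotone ranges ([1,3] and [-3,-1]) with two independent all() scans.
import Mathlib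
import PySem

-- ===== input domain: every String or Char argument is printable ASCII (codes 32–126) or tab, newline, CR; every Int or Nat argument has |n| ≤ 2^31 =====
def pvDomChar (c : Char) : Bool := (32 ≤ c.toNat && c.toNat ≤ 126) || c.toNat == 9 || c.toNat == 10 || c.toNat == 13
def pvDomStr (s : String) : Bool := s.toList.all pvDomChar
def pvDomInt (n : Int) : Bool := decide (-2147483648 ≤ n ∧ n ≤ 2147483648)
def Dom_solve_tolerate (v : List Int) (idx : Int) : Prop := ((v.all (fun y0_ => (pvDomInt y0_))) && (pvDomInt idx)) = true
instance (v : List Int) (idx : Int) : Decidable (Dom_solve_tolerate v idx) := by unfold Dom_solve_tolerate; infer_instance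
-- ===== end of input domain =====

-- B builds the filtered sequence and its difference list once and tests the two
-- allowed monotone patterns with two independent scans (alternative decomposition).
-- All reachable indices are provably in range, so pyGetD is exact here.

-- ===== PORT A =====
-- helper arr(v, i, idx)
def arrA (v : List Int) (idx : Int) (i : Int) : Int :=
  if i < idx then PySem.List.pyGetD v i 0 else PySem.List.pyGetD v (i + 1) 0

-- the for-loop over range(len(v)-2) with its two early returns
def loopA (v : List Int) (idx : Int) (inc : Bool) : List Int → Bool
  | [] => true
  | i :: rest =>
    if (inc && decide (arrA v idx i ≥ arrA v idx (i + 1))) ||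
       (!inc && decide (arrA v idx i < arrA v idx (i + 1))) then false
    else if decide (arrA v idx i = arrA v idx (i + 1)) ||
            decide ((arrA v idx i - arrA v idx (i + 1)).natAbs > 3) then false
    else loopA v idx inc rest

def solve_tolerate (v : List Int) (idx : Int) : Bool :=
  if v.length < 3 then false
  else
    let inc := decide (arrA v idx 0 < arrA v idx 1)
    loopA v idx inc (PySem.List.pyRange 0 ((v.length : Int) - 2) 1)

-- ===== PORT B =====
def solve_tolerate_alt (v : List Int) (idx : Int) : Bool :=
  if v.length < 3 then false
  else
    let w := (List.range (v.length - 1)).map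
      (fun (i : Nat) => if (i : Int) < idx then PySem.List.pyGetD v (i : Int) 0
                        else PySem.List.pyGetD v ((i : Int) + 1) 0)
    let diffs := (List.range (w.length - 1)).map (fun i => w.getD (i + 1) 0 - w.getD i 0)
    diffs.all (fun d => decide (1 ≤ d ∧ d ≤ 3)) || diffs.all (fun d => decide (-3 ≤ d ∧ d ≤ -1))

-- ===== PRECONDITION & SPEC =====
def Spec_solve_tolerate (v : List Int) (idx : Int) (out : Bool) : Prop := out = solve_tolerate_alt v idx
instance (v : List Int) (idx : Int) (out : Bool) : Decidable (Spec_solve_tolerate v idx out) := by unfold Spec_solve_tolerate; infer_instance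

-- ===== CLAIM (what is proved, stated in full; the proofs are below) =====
def Claim_equal_solve_tolerate : Prop := ∀ (v : List Int) (idx : Int), Dom_solve_tolerate v idx → Spec_solve_tolerate v idx (solve_tolerate v idx)

-- ===== LEMMAS AND PROOFS =====

theorem all_congr_mem {α : Type} (l : List α) (f g : α → Bool)
    (h : ∀ x ∈ l, f x = g x) : l.all f = l.all g := by
  induction l with
  | nil => rfl
  | cons x xs ih =>
    simp only [List.all_cons, h x (by simp), ih (fun y hy => h y (by simp [hy]))]

-- the step of A's loop, as a single boolean
def okA (v : List Int) (idx : Int) (inc : Bool) (i : Int) : Bool :=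
  !((inc && decide (arrA v idx i ≥ arrA v idx (i + 1))) ||
    (!inc && decide (arrA v idx i < arrA v idx (i + 1)))) &&
  !(decide (arrA v idx i = arrA v idx (i + 1)) ||
    decide ((arrA v idx i - arrA v idx (i + 1)).natAbs > 3))

theorem loopA_cons (v : List Int) (idx : Int) (inc : Bool) (i : Int) (rest : List Int) :
    loopA v idx inc (i :: rest) = (okA v idx inc i && loopA v idx inc rest) := by
  cases inc <;> simp only [loopA, okA] <;> split_ifs <;> simp_all <;> (intro h2 h3; exfalso; omega)

theorem loopA_eq_all (v : List Int) (idx : Int) (inc : Bool) (l : List Int) :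
    loopA v idx inc l = l.all (okA v idx inc) := by
  induction l with
  | nil => rfl
  | cons i rest ih => rw [loopA_cons, ih, List.all_cons]

theorem okA_true (v : List Int) (idx : Int) (i : Int) :
    okA v idx true i = decide (1 ≤ arrA v idx (i + 1) - arrA v idx i ∧ arrA v idx (i + 1) - arrA v idx i ≤ 3) := by
  rw [Bool.eq_iff_iff]
  simp [okA]
  omega

theorem okA_false (v : List Int) (idx : Int) (i : Int) :
    okA v idx false i = decide (-3 ≤ arrA v idx (i + 1) - arrA v idx i ∧ arrA v idx (i + 1) - arrA v idx i ≤ -1) := by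
  rw [Bool.eq_iff_iff]
  simp [okA]
  omega

-- w[k] (B's filtered list) agrees with A's arr on in-range indices
theorem wget_eq_arrA (v : List Int) (idx : Int) (k : Nat) (hk : k < v.length - 1) :
    ((List.range (v.length - 1)).map
      (fun (i : Nat) => if (i : Int) < idx then PySem.List.pyGetD v (i : Int) 0
                        else PySem.List.pyGetD v ((i : Int) + 1) 0)).getD k 0 = arrA v idx k := by
  rw [List.getD_eq_getElem?_getD, List.getElem?_map, List.getElem?_range hk]
  simp [arrA]

theorem solve_eq (v : List Int) (idx : Int) :
    solve_tolerate v idx = solve_tolerate_alt v idx := by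
  by_cases hlen : v.length < 3
  · simp [solve_tolerate, solve_tolerate_alt, hlen]
  · have hv : 3 ≤ v.length := by omega
    set m := v.length - 2 with hm
    have hm1 : 1 ≤ m := by omega
    set d : Nat → Int := fun k => arrA v idx ((k : Int) + 1) - arrA v idx (k : Int) with hd
    have hA : ∀ inc, loopA v idx inc (PySem.List.pyRange 0 ((v.length : Int) - 2) 1)
        = (List.range m).all (fun k => okA v idx inc (k : Int)) := by
      intro inc
      rw [loopA_eq_all, show ((v.length : Int) - 2) = ((m : Nat) : Int) from by omega,
        PySem.List.pyRange_zero_nat, List.all_map]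
      rfl
    have hwlen : ((List.range (v.length - 1)).map
        (fun (i : Nat) => if (i : Int) < idx then PySem.List.pyGetD v (i : Int) 0
                          else PySem.List.pyGetD v ((i : Int) + 1) 0)).length - 1 = m := by
      simp; omega
    have hdiffs : ∀ (p : Int → Bool),
        (((List.range m).map (fun i =>
            ((List.range (v.length - 1)).map
              (fun (i : Nat) => if (i : Int) < idx then PySem.List.pyGetD v (i : Int) 0
                                else PySem.List.pyGetD v ((i : Int) + 1) 0)).getD (i + 1) 0 -
            ((List.range (v.length - 1)).map
              (fun (i : Nat) => if (i : Int) < idx then PySem.List.pyGetD v (i : Int) 0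
                                else PySem.List.pyGetD v ((i : Int) + 1) 0)).getD i 0)).all p)
        = (List.range m).all (fun k => p (d k)) := by
      intro p
      rw [List.all_map]
      apply all_congr_mem
      intro k hk
      have hk' : k < m := List.mem_range.mp hk
      simp only [Function.comp]
      rw [wget_eq_arrA v idx (k + 1) (by omega), wget_eq_arrA v idx k (by omega)]
      simp [hd]
    simp only [solve_tolerate, solve_tolerate_alt, hlen, if_false, hwlen]
    rw [hdiffs, hdiffs]
    have hd0 : d 0 = arrA v idx 1 - arrA v idx 0 := by simp [hd]
    have hinc : decide (arrA v idx 0 < arrA v idx 1) = decide (0 < d 0) := by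
      rw [decide_eq_decide]; omega
    rw [hA, hinc]
    have h0 : 0 ∈ List.range m := List.mem_range.mpr (by omega)
    by_cases hpos : 0 < d 0
    · simp only [hpos, decide_true]
      have hneg : (List.range m).all (fun k => decide (-3 ≤ d k ∧ d k ≤ -1)) = false := by
        rw [List.all_eq_false]
        exact ⟨0, h0, by simp only [decide_eq_true_eq]; omega⟩
      rw [hneg, Bool.or_false]
      apply all_congr_mem
      intro k _
      rw [okA_true]
    · simp only [hpos, decide_false]
      have hposall : (List.range m).all (fun k => decide (1 ≤ d k ∧ d k ≤ 3)) = false := by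
        rw [List.all_eq_false]
        exact ⟨0, h0, by simp only [decide_eq_true_eq]; omega⟩
      rw [hposall, Bool.false_or]
      apply all_congr_mem
      intro k _
      rw [okA_false]

-- ===== VERDICT (by name: the statement is the Claim_ definition above) =====
theorem solve_tolerate_spec : Claim_equal_solve_tolerate := by
  intro v idx _
  exact solve_eq v idx
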